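-- pv_equiv track=rewrite | github.com/pypi-data/pypi-mirror-368 | packages/algmatch/algmatch-1.2.0.tar.gz/algmatch-1.2.0/src/algmatch/abstractClasses/abstractPreferenceInstanceWithTies.py | any_repetitions
-- ===== SOURCE A (Python) =====
-- def any_repetitions(prefs):
--     seen_count = 0
--     seen_set = set()
--     for tie in prefs:
--         seen_count += len(tie)
--         seen_set |= tie
--     if len(seen_set) != seen_count:
--         return True
--     return False
-- ===== SOURCE B (Python) =====
-- def any_repetitions(prefs):
--     seen = set()
--     for tie in prefs:
--         if seen & tie:
--             return True
--         seen |= tie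
--     return False
-- ===== Notes on version B (the rewrite author's own statement) =====
-- stated objective: alternative
-- what changed: B replaces A's total-count-vs-union-size comparison after a full pass with an incremental scan keeping only a running seen set, testing each tie for overlap (seen & tie) and short-circuiting with True on the first overlap.
import Mathlib
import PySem

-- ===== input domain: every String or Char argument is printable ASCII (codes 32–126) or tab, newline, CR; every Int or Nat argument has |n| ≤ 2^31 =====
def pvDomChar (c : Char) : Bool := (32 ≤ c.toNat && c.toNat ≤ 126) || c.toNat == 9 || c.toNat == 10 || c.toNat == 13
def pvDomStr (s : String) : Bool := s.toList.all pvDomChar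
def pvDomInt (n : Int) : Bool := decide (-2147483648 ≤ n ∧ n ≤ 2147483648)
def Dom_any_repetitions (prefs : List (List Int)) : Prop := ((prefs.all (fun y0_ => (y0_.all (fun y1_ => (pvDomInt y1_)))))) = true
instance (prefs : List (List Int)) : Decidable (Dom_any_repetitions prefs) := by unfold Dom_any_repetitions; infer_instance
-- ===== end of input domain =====

-- B: incremental scan with a running seen set and short-circuit overlap test (alternative
-- decomposition of the same O(total) work; not claimed faster).
-- Python parameter type is list[set[int]]: each inner list stands for a set (PySem.Set).

-- ===== PORT A =====
-- A: one pass summing len(tie) and unioning into seen_set, then compares count to union size.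
def any_repetitions (prefs : List (List Int)) : Bool :=
  let st := prefs.foldl
    (fun (p : Int × PySem.Set Int) tie =>
      (p.1 + PySem.Set.len (PySem.Set.ofList tie), PySem.Set.union p.2 tie))
    ((0 : Int), (PySem.Set.empty : PySem.Set Int))
  if PySem.Set.len st.2 ≠ st.1 then true else false

-- ===== PORT B =====
def anyRepsGo (seen : PySem.Set Int) : List (List Int) → Bool
  | [] => false
  | tie :: rest =>
    if PySem.Set.inter seen (PySem.Set.ofList tie) ≠ ([] : List Int) then true
    else anyRepsGo (PySem.Set.union seen tie) rest

def any_repetitions_alt (prefs : List (List Int)) : Bool :=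
  anyRepsGo PySem.Set.empty prefs

-- ===== PRECONDITION & SPEC =====
def Spec_any_repetitions (prefs : List (List Int)) (out : Bool) : Prop := out = any_repetitions_alt prefs
instance (prefs : List (List Int)) (out : Bool) : Decidable (Spec_any_repetitions prefs out) := by unfold Spec_any_repetitions; infer_instance

-- ===== CLAIM (what is proved, stated in full; the proofs are below) =====
def Claim_equal_any_repetitions : Prop := ∀ (prefs : List (List Int)), Dom_any_repetitions prefs → Spec_any_repetitions prefs (any_repetitions prefs)

-- ===== LEMMAS AND PROOFS =====

-- ===== VERDICT (by name: the statement is the Claim_ definition above) =====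
-- abbreviation for A's folding step (proof-side only)
def aStep (p : Int × PySem.Set Int) (tie : List Int) : Int × PySem.Set Int :=
  (p.1 + PySem.Set.len (PySem.Set.ofList tie), PySem.Set.union p.2 tie)

-- the deficit count - |set| never decreases along A's fold
theorem deficit_mono (prefs : List (List Int)) (c : Int) (s : PySem.Set Int) :
    c - PySem.Set.len s ≤ (prefs.foldl aStep (c, s)).1 - PySem.Set.len (prefs.foldl aStep (c, s)).2 := by
  induction prefs generalizing c s with
  | nil => simp
  | cons tie rest ih =>
    refine le_trans ?_ (ih _ _)
    have hlen : (PySem.Set.union s tie).length ≤ s.length + (PySem.Set.ofList tie).length := by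
      rw [PySem.Set.union, PySem.Set.update_eq_append_filter]
      simp only [List.length_append, Nat.add_le_add_iff_left]
      exact List.length_filter_le _ _
    simp only [PySem.Set.len]
    omega

-- main invariant: B's scan from seen agrees with A's final comparison from (|seen|, seen)
theorem go_eq (prefs : List (List Int)) (seen : PySem.Set Int) (h : seen.Nodup) :
    anyRepsGo seen prefs =
      decide (PySem.Set.len (prefs.foldl aStep ((PySem.Set.len seen), seen)).2
        ≠ (prefs.foldl aStep ((PySem.Set.len seen), seen)).1) := by
  induction prefs generalizing seen with
  | nil => simp [anyRepsGo]
  | cons tie rest ih =>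
    have hstep : aStep ((PySem.Set.len seen), seen) tie =
        ((PySem.Set.len seen) + PySem.Set.len (PySem.Set.ofList tie), PySem.Set.union seen tie) := rfl
    by_cases hint : PySem.Set.inter seen (PySem.Set.ofList tie) = ([] : List Int)
    · -- no overlap: union is disjoint append, recurse
      have hdisj : ∀ x ∈ PySem.Set.ofList tie, x ∉ seen := by
        intro x hx hxs
        have : x ∈ PySem.Set.inter seen (PySem.Set.ofList tie) := by
          simp [PySem.Set.inter, List.mem_filter, PySem.Set.contains_eq_listContains, hxs,
            (PySem.Set.mem_ofList _ _).mp hx]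
        simp [hint] at this
      have hunion : PySem.Set.union seen tie = seen ++ PySem.Set.ofList tie := by
        rw [PySem.Set.union, PySem.Set.update_eq_append_filter]
        congr 1
        apply List.filter_eq_self.mpr
        intro x hx
        simp only [Bool.not_eq_eq_eq_not, Bool.not_true, PySem.Set.contains_eq_listContains]
        exact (Bool.not_eq_true _).mp (by simpa using fun hc => hdisj x hx (by simpa using hc))
      have hnd : (PySem.Set.union seen tie).Nodup := PySem.Set.nodup_union _ _ h
      have hlen : PySem.Set.len (PySem.Set.union seen tie)
          = PySem.Set.len seen + PySem.Set.len (PySem.Set.ofList tie) := by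
        rw [hunion]; simp [PySem.Set.len]
      rw [List.foldl_cons, hstep, ← hlen]
      simpa [anyRepsGo, hint] using ih (PySem.Set.union seen tie) hnd
    · -- overlap: B returns true; A's deficit is already positive and never shrinks
      have hB : anyRepsGo seen (tie :: rest) = true := by simp [anyRepsGo, hint]
      rw [hB]
      obtain ⟨x, hx⟩ := List.exists_mem_of_ne_nil _ hint
      have hxs : x ∈ seen ∧ x ∈ PySem.Set.ofList tie := by
        have := hx
        simp only [PySem.Set.inter, List.mem_filter, PySem.Set.contains_eq_listContains] at this
        exact ⟨this.1, by simpa using this.2⟩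
      have hstrict : (PySem.Set.union seen tie).length < seen.length + (PySem.Set.ofList tie).length := by
        rw [PySem.Set.union, PySem.Set.update_eq_append_filter]
        simp only [List.length_append, Nat.add_lt_add_iff_left]
        apply List.length_filter_lt_length_iff_exists.mpr
        exact ⟨x, hxs.2, by simp [PySem.Set.contains_eq_listContains, hxs.1]⟩
      have hmono := deficit_mono rest
        ((PySem.Set.len seen) + PySem.Set.len (PySem.Set.ofList tie)) (PySem.Set.union seen tie)
      rw [List.foldl_cons, hstep]
      simp only [PySem.Set.len] at hmono ⊢
      symm
      rw [decide_eq_true_iff]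
      omega

-- ===== VERDICT (by name: the statement is the Claim_ definition above) =====
theorem any_repetitions_spec : Claim_equal_any_repetitions := by
  intro prefs _
  unfold Spec_any_repetitions any_repetitions any_repetitions_alt
  have h := go_eq prefs PySem.Set.empty (by simp [PySem.Set.empty])
  have hlen0 : PySem.Set.len (PySem.Set.empty : PySem.Set Int) = 0 := rfl
  rw [h, hlen0]
  have : prefs.foldl aStep ((0 : Int), (PySem.Set.empty : PySem.Set Int))
      = prefs.foldl (fun (p : Int × PySem.Set Int) tie =>
          (p.1 + PySem.Set.len (PySem.Set.ofList tie), PySem.Set.union p.2 tie))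
        ((0 : Int), (PySem.Set.empty : PySem.Set Int)) := rfl
  rw [this]
  simp
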